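-- pv_equiv track=rewrite | github.com/lokeshajja/ipl_project | ipl/first.py | years_of_matches
-- ===== SOURCE A (Python) =====
-- def years_of_matches(data_array1):
--     years=[]
--     for i in data_array1[1:]:
--         year=i[1]
--         if year not in years:
--             years.append(year)
--     years.sort()
--     return years
-- ===== SOURCE B (Python) =====
-- def years_of_matches(data_array1):
--     ys = sorted(row[1] for row in data_array1[1:])
--     result = []
--     for y in ys:
--         if not result or result[-1] != y:
--             result.append(y)
--     return result
-- ===== Notes on version B (the rewrite author's own statement) =====
-- stated objective: alternative
-- what changed: A scans the accumulator with 'not in' for every row (first-occurrence dedup) and then sorts; B sorts all column-1 values once and removes adjacent duplicates in a single pass, with no membership scan.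
import Mathlib
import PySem

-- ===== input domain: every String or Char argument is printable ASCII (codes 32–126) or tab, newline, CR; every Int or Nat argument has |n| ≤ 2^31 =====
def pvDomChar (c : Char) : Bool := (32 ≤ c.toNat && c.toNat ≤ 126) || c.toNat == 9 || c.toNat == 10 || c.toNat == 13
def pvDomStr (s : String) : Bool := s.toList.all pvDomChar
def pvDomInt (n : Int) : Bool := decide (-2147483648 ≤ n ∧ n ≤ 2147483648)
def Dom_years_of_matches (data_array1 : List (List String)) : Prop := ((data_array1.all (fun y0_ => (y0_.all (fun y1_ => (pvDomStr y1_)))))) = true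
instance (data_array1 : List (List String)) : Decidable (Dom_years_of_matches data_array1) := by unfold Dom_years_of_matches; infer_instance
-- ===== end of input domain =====

-- B sorts all column-1 values once and collapses adjacent duplicates in one pass,
-- instead of A's repeated 'not in' membership scans followed by a sort (objective: alternative).
-- A mutates nothing observable except its local list; equivalence is about the return value.

-- ===== PORT A =====
-- loop body of A: append year unless already collected
def pvStepA (years : List String) (year : String) : List String :=
  if year ∈ years then years else years ++ [year]

def years_of_matches (data_array1 : List (List String)) : List String :=
  let years := (data_array1.drop 1).foldl
    (fun years i => pvStepA years (PySem.List.pyGetD i 1 "")) []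
  PySem.List.sorted years (fun x => x) false

-- ===== PORT B =====
-- loop body of B: append y when result is empty or differs from result[-1]
def pvStepB (result : List String) (y : String) : List String :=
  if result = [] ∨ PySem.List.pyGetD result (-1) "" ≠ y then result ++ [y] else result

def years_of_matches_alt (data_array1 : List (List String)) : List String :=
  let ys := PySem.List.sorted
    ((data_array1.drop 1).map (fun row => PySem.List.pyGetD row 1 "")) (fun x => x) false
  ys.foldl pvStepB []

-- ===== PRECONDITION & SPEC =====
-- Pre_ excludes exactly the inputs where A raises IndexError: some data row with fewer than 2 columns.
def Pre_years_of_matches (data_array1 : List (List String)) : Prop :=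
  ∀ row ∈ data_array1.drop 1, 2 ≤ row.length
instance (data_array1 : List (List String)) : Decidable (Pre_years_of_matches data_array1) := by
  unfold Pre_years_of_matches; infer_instance

def pvWitness_years_of_matches : List (List String) :=
  [["match", "year"], ["1", "2017"], ["2", "2016"], ["3", "2017"]]

def Spec_years_of_matches (data_array1 : List (List String)) (out : List String) : Prop := out = years_of_matches_alt data_array1
instance (data_array1 : List (List String)) (out : List String) : Decidable (Spec_years_of_matches data_array1 out) := by unfold Spec_years_of_matches; infer_instance

-- ===== CLAIM (what is proved, stated in full; the proofs are below) =====
def Claim_equal_years_of_matches : Prop := ∀ (data_array1 : List (List String)), Dom_years_of_matches data_array1 → Pre_years_of_matches data_array1 → Spec_years_of_matches data_array1 (years_of_matches data_array1)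

-- ===== LEMMAS AND PROOFS =====

-- A's fold collects exactly the values of its input list.
theorem mem_foldl_stepA (zs : List String) (acc : List String) (x : String) :
    x ∈ zs.foldl pvStepA acc ↔ x ∈ acc ∨ x ∈ zs := by
  induction zs generalizing acc with
  | nil => simp
  | cons y t ih =>
    simp only [List.foldl_cons, ih, pvStepA]
    split_ifs with h
    · simp only [List.mem_cons]
      constructor
      · rintro (h1 | h2) <;> tauto
      · rintro (h1 | h1 | h1) <;> [tauto; (subst h1; tauto); tauto]
    · simp [List.mem_append, List.mem_cons]; tauto

theorem nodup_foldl_stepA (zs : List String) (acc : List String) (h : acc.Nodup) :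
    (zs.foldl pvStepA acc).Nodup := by
  induction zs generalizing acc with
  | nil => exact h
  | cons y t ih =>
    simp only [List.foldl_cons, pvStepA]
    split_ifs with hy
    · exact ih acc h
    · refine ih _ ?_
      exact List.nodup_append.2 ⟨h, List.nodup_singleton y,
        fun a ha b hb hab => hy (by rw [List.mem_singleton] at hb; rw [← hb, ← hab]; exact ha)⟩

-- B's fold is Mathlib's destutter' once the accumulator is nonempty.
theorem foldl_stepB_eq_destutter' (zs : List String) (pre : List String) (p : String) :
    zs.foldl pvStepB (pre ++ [p]) = pre ++ List.destutter' (· ≠ ·) p zs := by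
  induction zs generalizing pre p with
  | nil => simp [List.destutter']
  | cons y t ih =>
    simp only [List.foldl_cons, pvStepB]
    have hlast : PySem.List.pyGetD (pre ++ [p]) (-1) "" = p := by
      simp [PySem.List.pyGetD, PySem.List.pyGet?_neg_one_append_singleton]
    by_cases hpy : p = y
    · rw [if_neg (by simp [hpy]), List.destutter'_cons_neg t (by simp [hpy]), ih]
    · rw [if_pos (by simp [hlast, hpy]), List.destutter'_cons_pos t hpy]
      rw [show pre ++ [p] ++ [y] = (pre ++ [p]) ++ [y] by simp, ih]
      simp

theorem foldl_stepB_eq_destutter (zs : List String) :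
    zs.foldl pvStepB [] = List.destutter (· ≠ ·) zs := by
  cases zs with
  | nil => rfl
  | cons h t =>
    have h1 : pvStepB [] h = [] ++ [h] := by simp [pvStepB]
    rw [List.foldl_cons, h1, foldl_stepB_eq_destutter' t [] h]
    simp [List.destutter]

-- destutter' with (≠) keeps at least one copy of every value.
theorem mem_destutter'_ne (l : List String) (p x : String) (hx : x ∈ p :: l) :
    x ∈ List.destutter' (· ≠ ·) p l := by
  induction l generalizing p with
  | nil => simpa [List.destutter'] using hx
  | cons b t ih =>
    by_cases hpb : p = b
    · rw [List.destutter'_cons_neg t (by simp [hpb])]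
      apply ih p
      rcases List.mem_cons.1 hx with h | h
      · exact List.mem_cons.2 (Or.inl h)
      · rw [hpb]; exact h
    · rw [List.destutter'_cons_pos t hpb]
      rcases List.mem_cons.1 hx with h | h
      · exact List.mem_cons.2 (Or.inl h)
      · exact List.mem_cons.2 (Or.inr (ih b h))

-- on a ≤-sorted list, destutter' with (≠) is strictly increasing.
theorem pairwise_lt_destutter'_ne (l : List String) (p : String)
    (h : (p :: l).Pairwise (· ≤ ·)) :
    (List.destutter' (· ≠ ·) p l).Pairwise (· < ·) := by
  induction l generalizing p with
  | nil => simp [List.destutter']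
  | cons b t ih =>
    rcases List.pairwise_cons.1 h with ⟨hp, hbt⟩
    by_cases hpb : p = b
    · rw [List.destutter'_cons_neg t (by simp [hpb])]
      refine ih p (List.pairwise_cons.2 ⟨fun y hy => ?_, (List.pairwise_cons.1 hbt).2⟩)
      exact hp y (List.mem_cons.2 (Or.inr hy))
    · rw [List.destutter'_cons_pos t hpb]
      refine List.pairwise_cons.2 ⟨fun y hy => ?_, ih b hbt⟩
      have hplb : p < b := lt_of_le_of_ne (hp b (List.mem_cons.2 (Or.inl rfl))) hpb
      rcases List.mem_cons.1 (List.Sublist.mem hy (List.destutter'_sublist t _ b)) with h1 | h1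
      · exact h1 ▸ hplb
      · exact lt_of_lt_of_le hplb ((List.pairwise_cons.1 hbt).1 y h1)

-- the crux: sorting A's first-occurrence dedup = adjacent dedup of any ≤-sorted list with the same values
theorem sorted_dedupA_eq_destutter (xs ys : List String)
    (hpw : ys.Pairwise (· ≤ ·)) (hmem : ∀ x, x ∈ ys ↔ x ∈ xs) :
    PySem.List.sorted (xs.foldl pvStepA []) (fun x => x) false = List.destutter (· ≠ ·) ys := by
  have hzs_lt : (List.destutter (· ≠ ·) ys).Pairwise (· < ·) := by
    cases ys with
    | nil => simp [List.destutter]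
    | cons h t => exact pairwise_lt_destutter'_ne t h hpw
  have hzs_mem : ∀ x, x ∈ List.destutter (· ≠ ·) ys ↔ x ∈ ys := by
    intro x
    constructor
    · exact fun hx => List.Sublist.mem hx (List.destutter_sublist _ ys)
    · intro hx
      cases ys with
      | nil => simp at hx
      | cons h t => exact mem_destutter'_ne t h x hx
  have hperm : (List.destutter (· ≠ ·) ys).Perm (xs.foldl pvStepA []) := by
    rw [List.perm_ext_iff_of_nodup (hzs_lt.imp ne_of_lt) (nodup_foldl_stepA xs [] List.nodup_nil)]
    intro x
    rw [hzs_mem x, mem_foldl_stepA]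
    simp [hmem x]
  exact PySem.List.sorted_eq_of_perm_of_pairwise_lt _ _ _ hperm hzs_lt

-- ===== VERDICT (by name: the statement is the Claim_ definition above) =====
theorem years_of_matches_spec : Claim_equal_years_of_matches := by
  intro d _ _
  unfold Spec_years_of_matches years_of_matches years_of_matches_alt
  have hA : (d.drop 1).foldl (fun years i => pvStepA years (PySem.List.pyGetD i 1 "")) []
      = ((d.drop 1).map (fun row => PySem.List.pyGetD row 1 "")).foldl pvStepA [] :=
    (List.foldl_map).symm
  rw [hA, foldl_stepB_eq_destutter]
  exact sorted_dedupA_eq_destutter _ _ (PySem.List.sorted_pairwise _ _)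
    (fun x => by simp [PySem.List.mem_sorted])
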